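-- pv_equiv track=rewrite | github.com/victoralfred/jiraone | src/jiraone/file_io.py | replacement_placeholder
-- ===== SOURCE A (Python) =====
-- from typing import Any, Iterable, List, Optional, Union
--
-- def replacement_placeholder(
--     string: str,
--     data: List[str],
--     iterable: List[str],
--     row: int = 2,
-- ) -> Optional[List[str]]:
--     """Replace multiple occurrences of a placeholder in strings.
--
--     :param string: The placeholder string to replace
--     :param data: List of strings containing the placeholder
--     :param iterable: List of replacement values
--     :param row: Index of the row to check for placeholder
--     :return: List of strings with replacements made
--
--     Example::
--
--         hold = ["Hello", "John doe", "Post mortem"]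
--         text = ["<name> <name>, welcome to the <name>"]
--         result = replacement_placeholder("<name>", text, hold, 0)
--         # result: ["Hello John doe, welcome to the Post mortem"]
--     """
--     result = None
--     length = len(iterable)
--
--     for count, _ in enumerate(iterable):
--         if count == 0:
--             if string in data[row]:
--                 result = [
--                     line.replace(string, iterable[count], 1)
--                     for line in data
--                 ]
--         elif count > 0 and result is not None:
--             if string in result[row]:
--                 result = [
--                     line.replace(string, iterable[count], 1)
--                     for line in result
--                 ]
--
--         if count >= length:
--             break
--
--     return result
-- ===== SOURCE B (Python) =====
-- def replacement_placeholder(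
--     string,
--     data,
--     iterable,
--     row=2,
-- ):
--     """Replace multiple occurrences of a placeholder in strings.
--
--     Two-phase rewrite: first determine, from the row line alone, how many
--     replacement values are actually consumed (the rounds stop as soon as the
--     row line no longer contains the placeholder or the values run out); then
--     apply exactly those values to each line in one pass over the data.
--     """
--     if not iterable:
--         return None
--     current = data[row]
--     values = []
--     for value in iterable:
--         if string not in current:
--             break
--         current = current.replace(string, value, 1)
--         values.append(value)
--     if not values:
--         return None
--     return [_apply_all(line, string, values) for line in data]
--
--
-- def _apply_all(line, string, values):
--     for value in values:
--         line = line.replace(string, value, 1)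
--     return line
-- ===== Notes on version B (the rewrite author's own statement) =====
-- stated objective: alternative
-- what changed: B first simulates the rounds on the row line alone to determine the consumed replacement values (stopping as soon as the row loses the placeholder), then applies exactly those values to each line in a single pass, instead of A's loop over the whole iterable that rebuilds the entire list every round and keeps re-checking the row even after replacements have stopped.
import Mathlib
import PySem

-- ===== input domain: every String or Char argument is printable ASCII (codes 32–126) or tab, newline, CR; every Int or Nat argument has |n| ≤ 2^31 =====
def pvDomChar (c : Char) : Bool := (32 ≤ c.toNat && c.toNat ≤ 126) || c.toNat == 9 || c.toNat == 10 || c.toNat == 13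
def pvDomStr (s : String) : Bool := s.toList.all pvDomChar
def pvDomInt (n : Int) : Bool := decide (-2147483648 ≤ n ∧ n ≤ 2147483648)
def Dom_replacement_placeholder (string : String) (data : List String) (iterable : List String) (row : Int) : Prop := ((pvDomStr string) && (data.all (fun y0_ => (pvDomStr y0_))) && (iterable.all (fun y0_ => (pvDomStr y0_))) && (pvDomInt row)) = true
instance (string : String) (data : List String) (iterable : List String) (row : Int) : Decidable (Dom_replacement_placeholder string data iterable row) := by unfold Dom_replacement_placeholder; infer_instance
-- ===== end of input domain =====

-- ===== PORT A =====
-- Equivalence of return values; neither program mutates its arguments.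
-- B is a two-phase rewrite: it computes the consumed replacement values from the row line
-- alone, then applies them to each line once.

-- Hand port of Python's `s.replace(old, new, 1)` (replace FIRST occurrence only; PySem.Str.replace
-- has no count argument). Exact: for old = "" Python prepends new (s.replace("", v, 1) == v + s);
-- otherwise the first occurrence, found by PySem.Chars.find, is spliced out.
def pvReplace1C (s old new : List Char) : List Char :=
  if old = [] then new ++ s
  else
    let i := PySem.Chars.find s old
    if i = -1 then s else s.take i.toNat ++ new ++ s.drop (i.toNat + old.length)

def pvReplace1 (line string new : String) : String :=
  String.ofList (pvReplace1C line.toList string.toList new.toList)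

def replacement_placeholder (string : String) (data : List String) (iterable : List String) (row : Int) : Option (List String) :=
  -- result = None; loop `for count, _ in enumerate(iterable)`.  The trailing
  -- `if count >= length: break` of A can never fire (count < length inside the loop),
  -- so the loop is a plain fold over enumerate(iterable); iterable[count] is the enumerated element.
  (PySem.List.enumerate iterable).foldl
    (fun (result : Option (List String)) (cv : Int × String) =>
      if cv.1 = 0 then
        if PySem.Str.isIn string ((PySem.List.pyGet? data row).getD "") then
          some (data.map (fun line => pvReplace1 line string cv.2))
        else result
      else
        match result with
        | none => none
        | some res =>
          if PySem.Str.isIn string ((PySem.List.pyGet? res row).getD "") then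
            some (res.map (fun line => pvReplace1 line string cv.2))
          else some res)
    none

-- ===== PORT B =====
-- phase 1: simulate the rounds on the row line alone, collecting the values actually consumed
def pvRounds (string : String) (cur : String) : List String → List String
  | [] => []
  | v :: vs =>
    if PySem.Str.isIn string cur then v :: pvRounds string (pvReplace1 cur string v) vs else []

-- phase 2: apply the consumed values to one line (Source B's _apply_all)
def pvApplyAll (line string : String) (values : List String) : String :=
  values.foldl (fun l v => pvReplace1 l string v) line

def replacement_placeholder_alt (string : String) (data : List String) (iterable : List String) (row : Int) : Option (List String) :=
  if iterable.isEmpty then none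
  else
    let values := pvRounds string ((PySem.List.pyGet? data row).getD "") iterable
    if values.isEmpty then none
    else some (data.map (fun line => pvApplyAll line string values))

-- ===== PRECONDITION & SPEC =====
-- Pre_ excludes exactly the inputs where A raises IndexError: when the iterable is non-empty,
-- `data[row]` is evaluated, so row must be a valid (possibly negative) index into data.
def Pre_replacement_placeholder (string : String) (data : List String) (iterable : List String) (row : Int) : Prop :=
  iterable ≠ [] → PySem.Raise.InRange data.length row
instance (string : String) (data : List String) (iterable : List String) (row : Int) : Decidable (Pre_replacement_placeholder string data iterable row) := by unfold Pre_replacement_placeholder; infer_instance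

def pvWitness_replacement_placeholder : String × List String × List String × Int :=
  ("<name>", ["<name> <name>, welcome to the <name>"], ["Hello", "John doe", "Post mortem"], 0)

def Spec_replacement_placeholder (string : String) (data : List String) (iterable : List String) (row : Int) (out : Option (List String)) : Prop := out = replacement_placeholder_alt string data iterable row
instance (string : String) (data : List String) (iterable : List String) (row : Int) (out : Option (List String)) : Decidable (Spec_replacement_placeholder string data iterable row out) := by unfold Spec_replacement_placeholder; infer_instance

-- ===== CLAIM (what is proved, stated in full; the proofs are below) =====
def Claim_equal_replacement_placeholder : Prop := ∀ (string : String) (data : List String) (iterable : List String) (row : Int), Dom_replacement_placeholder string data iterable row → Pre_replacement_placeholder string data iterable row → Spec_replacement_placeholder string data iterable row (replacement_placeholder string data iterable row)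

-- ===== LEMMAS AND PROOFS =====

theorem pvWitness_ok : Dom_replacement_placeholder pvWitness_replacement_placeholder.1 pvWitness_replacement_placeholder.2.1 pvWitness_replacement_placeholder.2.2.1 pvWitness_replacement_placeholder.2.2.2 ∧ Pre_replacement_placeholder pvWitness_replacement_placeholder.1 pvWitness_replacement_placeholder.2.1 pvWitness_replacement_placeholder.2.2.1 pvWitness_replacement_placeholder.2.2.2 := by
  decide

theorem pyGet?_map {α β : Type} (g : α → β) (l : List α) (i : Int) :
    PySem.List.pyGet? (l.map g) i = (PySem.List.pyGet? l i).map g := by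
  simp [PySem.List.pyGet?, PySem.List.pyIdx?]

theorem applyAll_append (line string : String) (acc : List String) (v : String) :
    pvApplyAll line string (acc ++ [v]) = pvReplace1 (pvApplyAll line string acc) string v := by
  simp [pvApplyAll, List.foldl_append]

theorem pvRounds_eq_nil (string cur : String) (vs : List String)
    (h : PySem.Str.isIn string cur = false) : pvRounds string cur vs = [] := by
  cases vs with
  | nil => rfl
  | cons a b => rw [pvRounds, h]; rfl

-- A's loop keeps state None forever (at every count ≥ 1 the `elif` needs a non-None result)
theorem foldl_none (string : String) (data : List String) (row : Int) (d0 : String) (vs : List String) :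
    ∀ (start : Int), 1 ≤ start →
    (PySem.List.enumerate vs start).foldl
      (fun (result : Option (List String)) (cv : Int × String) =>
        if cv.1 = 0 then
          if PySem.Str.isIn string d0 then
            some (data.map (fun line => pvReplace1 line string cv.2))
          else result
        else
          match result with
          | none => none
          | some res =>
            if PySem.Str.isIn string ((PySem.List.pyGet? res row).getD "") then
              some (res.map (fun line => pvReplace1 line string cv.2))
            else some res)
      none = none := by
  induction vs with
  | nil => intro start _; simp [PySem.List.enumerate_nil]
  | cons v vs ih =>
    intro start hs
    rw [PySem.List.enumerate_cons, List.foldl_cons]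
    have h0 : ¬ ((start, v).1 = 0) := by simp; omega
    simp only [h0, if_false]
    exact ih (start + 1) (by omega)

-- main invariant: from a non-None state built from the consumed prefix `acc`, A's remaining
-- fold consumes exactly the further values pvRounds consumes on the row line
theorem loop_inv (string : String) (data : List String) (row : Int) (d0 : String)
    (hd0 : PySem.List.pyGet? data row = some d0) (vs : List String) :
    ∀ (start : Int) (acc : List String), 1 ≤ start →
    (PySem.List.enumerate vs start).foldl
      (fun (result : Option (List String)) (cv : Int × String) =>
        if cv.1 = 0 then
          if PySem.Str.isIn string d0 then
            some (data.map (fun line => pvReplace1 line string cv.2))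
          else result
        else
          match result with
          | none => none
          | some res =>
            if PySem.Str.isIn string ((PySem.List.pyGet? res row).getD "") then
              some (res.map (fun line => pvReplace1 line string cv.2))
            else some res)
      (some (data.map (fun line => pvApplyAll line string acc)))
    = some (data.map (fun line =>
        pvApplyAll line string (acc ++ pvRounds string (pvApplyAll d0 string acc) vs))) := by
  induction vs with
  | nil => intro start acc _; simp [PySem.List.enumerate_nil, pvRounds]
  | cons v vs ih =>
    intro start acc hs
    rw [PySem.List.enumerate_cons, List.foldl_cons]
    have h0 : ¬ ((start, v).1 = 0) := by simp; omega
    simp only [h0, if_false]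
    have hrow : PySem.List.pyGet? (data.map (fun line => pvApplyAll line string acc)) row
        = some (pvApplyAll d0 string acc) := by
      rw [pyGet?_map, hd0]; rfl
    simp only [hrow, Option.getD_some]
    by_cases hg : PySem.Str.isIn string (pvApplyAll d0 string acc) = true
    · -- the row still contains the placeholder: one more round is performed
      have hstate : (data.map (fun line => pvApplyAll line string acc)).map
            (fun line => pvReplace1 line string v)
          = data.map (fun line => pvApplyAll line string (acc ++ [v])) := by
        rw [List.map_map]
        exact List.map_congr_left (fun line _ => (applyAll_append line string acc v).symm)
      rw [hg, if_pos rfl, hstate, ih (start + 1) (acc ++ [v]) (by omega)]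
      rw [pvRounds, if_pos hg, applyAll_append]
      simp
    · -- the row has lost the placeholder: nothing changes any more
      rw [Bool.not_eq_true] at hg
      rw [hg]
      simp only [Bool.false_eq_true, if_false]
      rw [ih (start + 1) acc (by omega)]
      rw [pvRounds_eq_nil string _ vs hg, pvRounds, hg]
      simp

-- ===== VERDICT (by name: the statement is the Claim_ definition above) =====
theorem replacement_placeholder_spec : Claim_equal_replacement_placeholder := by
  intro string data iterable row _ hpre
  unfold Spec_replacement_placeholder
  cases iterable with
  | nil => rfl
  | cons v vs =>
    have hin : PySem.Raise.InRange data.length row := hpre (by simp)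
    obtain ⟨d0, hd0⟩ : ∃ d0, PySem.List.pyGet? data row = some d0 := by
      cases h : PySem.List.pyGet? data row with
      | none => exact absurd hin ((PySem.List.pyGet?_eq_none_iff ..).mp h)
      | some x => exact ⟨x, rfl⟩
    unfold replacement_placeholder replacement_placeholder_alt
    rw [PySem.List.enumerate_cons, List.foldl_cons]
    simp only [List.isEmpty_cons, Bool.false_eq_true, if_false, hd0, Option.getD_some, zero_add,
      reduceIte]
    by_cases hg : PySem.Str.isIn string d0 = true
    · have hstate : data.map (fun line => pvReplace1 line string v)
          = data.map (fun line => pvApplyAll line string [v]) :=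
        List.map_congr_left (fun line _ => by simp [pvApplyAll])
    -- the first round fires; hand the resulting state to the loop invariant
      rw [if_pos hg, hstate, loop_inv string data row d0 hd0 vs 1 [v] (by omega)]
      rw [pvRounds, if_pos hg]
      have hone : pvApplyAll d0 string [v] = pvReplace1 d0 string v := by simp [pvApplyAll]
      simp [hone]
    · rw [Bool.not_eq_true] at hg
      rw [if_neg (by simpa using hg), foldl_none string data row d0 vs 1 (by omega)]
      rw [pvRounds, hg]
      rfl
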